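-- pv_equiv track=rewrite | github.com/jack77121/lambda-mock | shared/core/calculator.py | count_high_peaks
-- ===== SOURCE A (Python) =====
-- def count_high_peaks(tou_levels):
--     peaks = 0
--     in_peak = False
--
--     for level in tou_levels:
--         if level == "high":
--             if not in_peak:
--                 peaks += 1
--                 in_peak = True
--         else:
--             in_peak = False  # reset if not high
--
--     return peaks
-- ===== SOURCE B (Python) =====
-- def count_high_peaks(tou_levels):
--     # Counting identity: a run of k consecutive "high"s contributes k highs and
--     # k-1 adjacent high-high pairs, so #runs = #highs - #adjacent high-high pairs.
--     levels = list(tou_levels)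
--     highs = levels.count("high")
--     adjacent = sum(1 for a, b in zip(levels, levels[1:]) if a == "high" and b == "high")
--     return highs - adjacent
-- ===== Notes on version B (the rewrite author's own statement) =====
-- stated objective: alternative
-- what changed: Replaced A's stateful in_peak scan with a stateless counting identity: the number of runs of 'high' equals the total count of 'high' elements minus the number of adjacent high-high pairs, computed as two independent counts.
import Mathlib
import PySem

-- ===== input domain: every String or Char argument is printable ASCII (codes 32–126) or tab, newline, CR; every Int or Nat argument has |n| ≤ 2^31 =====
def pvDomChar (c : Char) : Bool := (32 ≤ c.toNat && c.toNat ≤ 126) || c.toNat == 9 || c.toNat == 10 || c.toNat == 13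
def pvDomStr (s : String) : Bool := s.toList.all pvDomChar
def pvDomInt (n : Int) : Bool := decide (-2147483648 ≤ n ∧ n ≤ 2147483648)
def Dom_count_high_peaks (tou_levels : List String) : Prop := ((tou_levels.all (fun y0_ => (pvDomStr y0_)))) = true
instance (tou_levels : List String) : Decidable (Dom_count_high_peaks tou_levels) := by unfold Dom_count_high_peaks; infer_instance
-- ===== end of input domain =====

-- B replaces A's stateful in_peak scan with a stateless counting identity:
-- #runs of "high" = #"high" elements - #adjacent high-high pairs (alternative; same cost).

-- ===== PORT A =====
-- Port of A: a fold over (peaks, in_peak), branches in A's order.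
def count_high_peaks (tou_levels : List String) : Int :=
  (tou_levels.foldl
    (fun (s : Int × Bool) level =>
      if level == "high" then
        if !s.2 then (s.1 + 1, true) else s
      else
        (s.1, false))
    (0, false)).1

-- ===== PORT B =====
-- Source B: highs = levels.count("high"); adjacent = Σ over zip(levels, levels[1:]); highs - adjacent.
-- levels[1:] is xs.tail (PySem.List.slice_from_one).
def count_high_peaks_alt (tou_levels : List String) : Int :=
  let highs : Int := (PySem.List.count tou_levels "high" : Int)
  let adjacent : Int :=
    ((tou_levels.zip tou_levels.tail).countP
      (fun p => p.1 == "high" && p.2 == "high") : Int)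
  highs - adjacent

-- ===== PRECONDITION & SPEC =====
def Spec_count_high_peaks (tou_levels : List String) (out : Int) : Prop := out = count_high_peaks_alt tou_levels
instance (tou_levels : List String) (out : Int) : Decidable (Spec_count_high_peaks tou_levels out) := by unfold Spec_count_high_peaks; infer_instance

-- ===== CLAIM (what is proved, stated in full; the proofs are below) =====
def Claim_equal_count_high_peaks : Prop := ∀ (tou_levels : List String), Dom_count_high_peaks tou_levels → Spec_count_high_peaks tou_levels (count_high_peaks tou_levels)

-- ===== LEMMAS AND PROOFS =====

-- A's loop as a structural recursion carrying the in_peak flag; returns the number of new peaks.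
def pvG (xs : List String) (b : Bool) : Int :=
  match xs with
  | [] => 0
  | l :: rest =>
      if l == "high" then (if b then pvG rest true else 1 + pvG rest true)
      else pvG rest false

lemma pvFold_eq_pvG (xs : List String) (p : Int) (b : Bool) :
    (xs.foldl
      (fun (s : Int × Bool) level =>
        if level == "high" then
          if !s.2 then (s.1 + 1, true) else s
        else
          (s.1, false))
      (p, b)).1 = p + pvG xs b := by
  induction xs generalizing p b with
  | nil => simp [pvG]
  | cons l rest ih =>
    simp only [List.foldl]
    by_cases h : (l == "high") = true
    · cases b
      · simp only [h, Bool.not_false, ite_true]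
        rw [ih, pvG, if_pos h]
        simp; ring
      · simp only [h, Bool.not_true, ite_true, ite_false]
        rw [ih, pvG, if_pos h]
        simp
    · simp only [h, Bool.false_eq_true, if_false]
      rw [ih, pvG, if_neg h]

-- the two counts of B, as Nat
def pvH (xs : List String) : Nat := xs.countP (fun l => l == "high")
def pvAdj (xs : List String) : Nat :=
  (xs.zip xs.tail).countP (fun p => p.1 == "high" && p.2 == "high")

lemma pvG_eq_counts (xs : List String) (b : Bool) :
    pvG xs b = (pvH xs : Int) - (pvAdj xs : Int)
      - (if b = true ∧ xs.head? = some "high" then 1 else 0) := by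
  induction xs generalizing b with
  | nil => simp [pvG, pvH, pvAdj]
  | cons l rest ih =>
    by_cases h : l = "high"
    · subst h
      have hadj : pvAdj ("high" :: rest)
          = (if rest.head? = some "high" then 1 else 0) + pvAdj rest := by
        cases rest with
        | nil => simp [pvAdj]
        | cons c r =>
          by_cases hc : c = "high" <;>
            simp [pvAdj, List.countP_cons, hc, Nat.add_comm]
      have hh : pvH ("high" :: rest) = pvH rest + 1 := by
        simp [pvH, List.countP_cons]
      cases b <;>
        · simp only [pvG, beq_self_eq_true, if_true, ih, hadj, hh, List.head?_cons]
          push_cast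
          split_ifs <;> simp_all <;> ring
    · have hadj : pvAdj (l :: rest) = pvAdj rest := by
        cases rest with
        | nil => simp [pvAdj]
        | cons c r => simp [pvAdj, List.countP_cons, h]
      have hh : pvH (l :: rest) = pvH rest := by
        simp [pvH, List.countP_cons, h]
      have hb : (l == "high") = false := by simp [beq_iff_eq, h]
      simp only [pvG, hb, Bool.false_eq_true, if_false, ih, hadj, hh, List.head?_cons]
      split_ifs <;> simp_all

-- ===== VERDICT (by name: the statement is the Claim_ definition above) =====
theorem count_high_peaks_spec : Claim_equal_count_high_peaks := by
  intro xs _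
  unfold Spec_count_high_peaks count_high_peaks count_high_peaks_alt
  rw [pvFold_eq_pvG, pvG_eq_counts]
  simp [PySem.List.count_eq, pvH, pvAdj, List.count_eq_countP]
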